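-- pv_equiv track=rewrite | github.com/Darkhouse13/publishing-service | src/automating_wf/export/pinterest_csv.py | _canonicalize_row
-- ===== SOURCE A (Python) =====
-- from typing import Any, Iterator
--
-- CSV_HEADERS = (
--     "Title",
--     "Media URL",
--     "Pinterest board",
--     "Thumbnail",
--     "Description",
--     "Link",
--     "Publish date",
--     "Keywords",
-- )
--
-- CSV_HEADER_ALIASES: dict[str, tuple[str, ...]] = {
--     "Title": ("Title",),
--     "Media URL": ("Media URL", "Image URL"),
--     "Pinterest board": ("Pinterest board", "Pinterest Board"),
--     "Thumbnail": ("Thumbnail",),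
--     "Description": ("Description",),
--     "Link": ("Link",),
--     "Publish date": ("Publish date", "Publish Date"),
--     "Keywords": ("Keywords",),
-- }
--
-- def _header_lookup(row: dict[str, Any]) -> dict[str, str]:
--     return {str(key).strip().casefold(): str(key) for key in row.keys()}
--
-- def _canonicalize_row(row: dict[str, Any]) -> dict[str, str]:
--     lookup = _header_lookup(row)
--     normalized: dict[str, str] = {}
--     for header in CSV_HEADERS:
--         value = ""
--         for alias in CSV_HEADER_ALIASES[header]:
--             source_key = lookup.get(alias.casefold())
--             if source_key is None:
--                 continue
--             raw = row.get(source_key, "")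
--             value = str(raw).strip() if raw is not None else ""
--             break
--         normalized[header] = value
--     return normalized
-- ===== SOURCE B (Python) =====
-- from typing import Any
--
-- CSV_HEADERS = (
--     "Title",
--     "Media URL",
--     "Pinterest board",
--     "Thumbnail",
--     "Description",
--     "Link",
--     "Publish date",
--     "Keywords",
-- )
--
-- CSV_HEADER_ALIASES: dict[str, tuple[str, ...]] = {
--     "Title": ("Title",),
--     "Media URL": ("Media URL", "Image URL"),
--     "Pinterest board": ("Pinterest board", "Pinterest Board"),
--     "Thumbnail": ("Thumbnail",),
--     "Description": ("Description",),
--     "Link": ("Link",),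
--     "Publish date": ("Publish date", "Publish Date"),
--     "Keywords": ("Keywords",),
-- }
--
-- # Reverse lookup: casefolded alias -> (canonical header, alias priority index).
-- # Built once; first occurrence of a casefolded form wins.
-- _REVERSE: dict[str, tuple[str, int]] = {}
-- for _header in CSV_HEADERS:
--     for _idx, _alias in enumerate(CSV_HEADER_ALIASES[_header]):
--         _REVERSE.setdefault(_alias.casefold(), (_header, _idx))
--
--
-- def _canonicalize_row(row: dict[str, Any]) -> dict[str, str]:
--     # One pass over the row: keep, per header, the best (lowest) alias index
--     # seen so far; an equal index from a later key overwrites (last key wins).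
--     best: dict[str, tuple[int, str]] = {}
--     for key, raw in row.items():
--         hit = _REVERSE.get(str(key).strip().casefold())
--         if hit is None:
--             continue
--         header, idx = hit
--         prev = best.get(header)
--         if prev is None or idx <= prev[0]:
--             best[header] = (idx, str(raw).strip() if raw is not None else "")
--     return {h: best[h][1] if h in best else "" for h in CSV_HEADERS}
-- ===== Notes on version B (the rewrite author's own statement) =====
-- stated objective: alternative
-- what changed: Instead of scanning each header's alias tuple against a per-row key-lookup dict, B precomputes a constant reverse map (casefolded alias -> (header, priority)) and makes a single pass over the row's items, keeping per header the value of the best-priority (lowest alias index, last key wins on ties) hit.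
import Mathlib
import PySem

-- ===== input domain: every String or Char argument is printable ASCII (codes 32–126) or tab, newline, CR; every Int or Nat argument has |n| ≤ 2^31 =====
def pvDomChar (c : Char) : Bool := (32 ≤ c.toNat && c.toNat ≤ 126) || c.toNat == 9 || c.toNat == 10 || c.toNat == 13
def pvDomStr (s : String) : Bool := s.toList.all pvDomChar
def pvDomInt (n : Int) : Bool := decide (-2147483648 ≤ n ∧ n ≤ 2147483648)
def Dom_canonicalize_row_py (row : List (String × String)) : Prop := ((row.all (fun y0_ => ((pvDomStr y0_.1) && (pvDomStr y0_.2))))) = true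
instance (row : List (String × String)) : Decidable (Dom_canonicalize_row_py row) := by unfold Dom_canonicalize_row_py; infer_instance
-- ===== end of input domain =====

-- B replaces A's per-header scan over alias tuples (through a full key-lookup dict built
-- from the row) by a precomputed reverse alias index and ONE pass over the row's items
-- keeping the best-priority hit per header (alternative decomposition, same exact result).

-- ===== PORT A =====
-- str(key).strip().casefold(); casefold = lower on the ASCII domain (both programs use it)
def pvSlc (s : String) : String := PySem.Str.lower (PySem.Str.strip s)

def pvCsvHeaders : List String :=
  ["Title", "Media URL", "Pinterest board", "Thumbnail", "Description", "Link",
   "Publish date", "Keywords"]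

def pvCsvAliases : PySem.Dict String (List String) :=
  PySem.Dict.ofList
    [("Title", ["Title"]),
     ("Media URL", ["Media URL", "Image URL"]),
     ("Pinterest board", ["Pinterest board", "Pinterest Board"]),
     ("Thumbnail", ["Thumbnail"]),
     ("Description", ["Description"]),
     ("Link", ["Link"]),
     ("Publish date", ["Publish date", "Publish Date"]),
     ("Keywords", ["Keywords"])]

-- _header_lookup: {str(key).strip().casefold(): str(key) for key in row.keys()}
def pvHeaderLookup (keys : List String) : PySem.Dict String String :=
  keys.foldl (fun lk k => lk.insert (pvSlc k) k) PySem.Dict.empty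

-- the inner `for alias in CSV_HEADER_ALIASES[header]: … break` loop; values are
-- strings here, so `raw is not None` always holds and value = str(raw).strip()
def pvAInner (d lookup : PySem.Dict String String) : List String → String
  | [] => ""
  | al :: rest =>
    match lookup.get? (PySem.Str.lower al) with
    | none => pvAInner d lookup rest
    | some sourceKey => PySem.Str.strip (d.getD sourceKey "")

def canonicalize_row_py (row : List (String × String)) : List (String × String) :=
  let d := PySem.Dict.ofList row
  let lookup := pvHeaderLookup d.keys
  (pvCsvHeaders.foldl
      (fun nm header => nm.insert header (pvAInner d lookup (pvCsvAliases.getD header [])))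
      PySem.Dict.empty).items

-- ===== PORT B =====
-- _REVERSE: casefolded alias -> (canonical header, priority); setdefault keeps the first
def pvReverse : PySem.Dict String (String × Int) :=
  pvCsvHeaders.foldl
    (fun rv header =>
      (PySem.List.enumerate (pvCsvAliases.getD header [])).foldl
        (fun rv ia => rv.setdefault (PySem.Str.lower ia.2) (header, ia.1))
        rv)
    PySem.Dict.empty

def pvBStep (best : PySem.Dict String (Int × String)) (kv : String × String) :
    PySem.Dict String (Int × String) :=
  match pvReverse.get? (pvSlc kv.1) with
  | none => best
  | some hit =>
    match best.get? hit.1 with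
    | none => best.insert hit.1 (hit.2, PySem.Str.strip kv.2)
    | some prev =>
      if hit.2 ≤ prev.1 then best.insert hit.1 (hit.2, PySem.Str.strip kv.2) else best

def canonicalize_row_py_alt (row : List (String × String)) : List (String × String) :=
  let best := (PySem.Dict.ofList row).items.foldl pvBStep PySem.Dict.empty
  pvCsvHeaders.map (fun h => (h, match best.get? h with | some p => p.2 | none => ""))

-- ===== PRECONDITION & SPEC =====
def Spec_canonicalize_row_py (row : List (String × String)) (out : List (String × String)) : Prop := out = canonicalize_row_py_alt row
instance (row : List (String × String)) (out : List (String × String)) : Decidable (Spec_canonicalize_row_py row out) := by unfold Spec_canonicalize_row_py; infer_instance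

-- ===== CLAIM (what is proved, stated in full; the proofs are below) =====
def Claim_equal_canonicalize_row_py : Prop := ∀ (row : List (String × String)), Dom_canonicalize_row_py row → Spec_canonicalize_row_py row (canonicalize_row_py row)

-- ===== LEMMAS AND PROOFS =====

-- the last row item whose stripped-casefolded key is c (the key that wins in both programs)
def pvLast (items : List (String × String)) (c : String) : Option (String × String) :=
  (items.filter (fun p => pvSlc p.1 == c)).getLast?

theorem pvLast_append (l : List (String × String)) (p : String × String) (c : String) :
    pvLast (l ++ [p]) c = if pvSlc p.1 == c then some p else pvLast l c := by
  by_cases h : pvSlc p.1 == c <;>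
    simp [pvLast, List.filter_append, h]

-- A's canonical value for one header, read off the row items through its alias list
def pvFval (items : List (String × String)) : List String → String
  | [] => ""
  | a :: rest =>
    match pvLast items (PySem.Str.lower a) with
    | some p => PySem.Str.strip p.2
    | none => pvFval items rest

-- B's best-entry for one header, read off the row items through its alias list
def pvG (items : List (String × String)) : Int → List String → Option (Int × String)
  | _, [] => none
  | i, a :: rest =>
    match pvLast items (PySem.Str.lower a) with
    | some p => some (i, PySem.Str.strip p.2)
    | none => pvG items (i + 1) rest

theorem pvG_fst_nonneg {items : List (String × String)} {i j : Int} {v : String}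
    {cs : List String} (h : pvG items i cs = some (j, v)) : i ≤ j := by
  induction cs generalizing i with
  | nil => simp [pvG] at h
  | cons a rest ih =>
    unfold pvG at h
    cases hml : pvLast items (PySem.Str.lower a) <;> rw [hml] at h
    · have := ih h; omega
    · simp at h; omega

theorem pvFval_pvG (items : List (String × String)) (i : Int) (cs : List String) :
    pvFval items cs = (match pvG items i cs with | some p => p.2 | none => "") := by
  induction cs generalizing i with
  | nil => rfl
  | cons a rest ih =>
    simp only [pvFval, pvG]
    cases hml : pvLast items (PySem.Str.lower a)
    · exact ih (i + 1)
    · rfl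

theorem pvLookup_get (keys : List String) (c : String) :
    (pvHeaderLookup keys).get? c =
      ((keys.filter (fun k => pvSlc k == c)).getLast?).elim none some := by
  unfold pvHeaderLookup
  induction keys using List.reverseRecOn with
  | nil => rfl
  | append_singleton l k ih =>
    rw [List.foldl_append]
    simp only [List.foldl_cons, List.foldl_nil]
    by_cases h : (pvSlc k == c) = true
    · have hc : pvSlc k = c := by simpa using h
      rw [hc, PySem.Dict.get?_insert_self]
      simp [List.filter_append, h]
    · have hb : (pvSlc k == c) = false := by simpa using h
      have hc : c ≠ pvSlc k := fun he => by simp [he] at hb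
      rw [PySem.Dict.get?_insert_of_ne _ _ hc]
      simpa [List.filter_append, hb] using ih

theorem pvFind_nodup {l : List (String × String)} {p : String × String}
    (hp : p ∈ l) (hnd : (l.map Prod.fst).Nodup) :
    l.find? (fun q => q.1 == p.1) = some p := by
  induction l with
  | nil => cases hp
  | cons q l ih =>
    simp only [List.map_cons, List.nodup_cons] at hnd
    rcases List.mem_cons.mp hp with hp' | hp'
    · subst hp'; simp [List.find?]
    · have hne : (q.1 == p.1) = false := by
        simp only [beq_eq_false_iff_ne, ne_eq]
        intro he
        exact hnd.1 (he ▸ List.mem_map_of_mem hp')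
      simp [List.find?, hne, ih hp' hnd.2]

theorem pvGet?_mem {d : PySem.Dict String String} {p : String × String}
    (hp : p ∈ d.items) (hnd : d.keys.Nodup) : d.get? p.1 = some p.2 := by
  have hnd' : (d.items.map Prod.fst).Nodup := hnd
  simp [PySem.Dict.get?, pvFind_nodup hp hnd']

theorem pvKeys_filter (items : List (String × String)) (c : String) :
    (items.map Prod.fst).filter (fun k => pvSlc k == c) =
      (items.filter (fun p => pvSlc p.1 == c)).map Prod.fst := by
  rw [List.filter_map]; rfl

theorem pvAInner_eq (d : PySem.Dict String String) (hnd : d.keys.Nodup) (cs : List String) :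
    pvAInner d (pvHeaderLookup d.keys) cs = pvFval d.items cs := by
  induction cs with
  | nil => rfl
  | cons a rest ih =>
    simp only [pvAInner, pvFval]
    have hk : d.keys = d.items.map Prod.fst := rfl
    rw [pvLookup_get, hk, pvKeys_filter, List.getLast?_map]
    cases hml : pvLast d.items (PySem.Str.lower a)
    · simp only [pvLast] at hml
      rw [hml]
      exact ih
    · rename_i p
      have hpm : p ∈ d.items := List.mem_of_mem_filter (List.mem_of_getLast? hml)
      simp only [pvLast] at hml
      rw [hml]
      simp only [Option.map_some, Option.elim]
      rw [show d.getD p.1 "" = p.2 by simp [PySem.Dict.getD, pvGet?_mem hpm hnd]]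

theorem pvGet?_some_mem {ν : Type} {d : PySem.Dict String ν} {k : String} {v : ν}
    (h : d.get? k = some v) : (k, v) ∈ d.items := by
  simp only [PySem.Dict.get?, Option.map_eq_some_iff] at h
  obtain ⟨q, hq, hv⟩ := h
  have h1 := List.find?_some hq
  have h2 := List.mem_of_find?_eq_some hq
  have hq1 : q.1 = k := by simpa using h1
  have hq' : q = (k, v) := by cases q; simp_all
  exact hq' ▸ h2

theorem pvReverse_items : pvReverse.items =
    [("title", ("Title", 0)), ("media url", ("Media URL", 0)), ("image url", ("Media URL", 1)),
     ("pinterest board", ("Pinterest board", 0)), ("thumbnail", ("Thumbnail", 0)),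
     ("description", ("Description", 0)), ("link", ("Link", 0)),
     ("publish date", ("Publish date", 0)), ("keywords", ("Keywords", 0))] := by rfl

-- evaluated casefolds of the aliases
theorem pvLow1 : PySem.Str.lower "Title" = "title" := rfl
theorem pvLow2 : PySem.Str.lower "Media URL" = "media url" := rfl
theorem pvLow3 : PySem.Str.lower "Image URL" = "image url" := rfl
theorem pvLow4 : PySem.Str.lower "Pinterest board" = "pinterest board" := rfl
theorem pvLow4' : PySem.Str.lower "Pinterest Board" = "pinterest board" := rfl
theorem pvLow5 : PySem.Str.lower "Thumbnail" = "thumbnail" := rfl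
theorem pvLow6 : PySem.Str.lower "Description" = "description" := rfl
theorem pvLow7 : PySem.Str.lower "Link" = "link" := rfl
theorem pvLow8 : PySem.Str.lower "Publish date" = "publish date" := rfl
theorem pvLow8' : PySem.Str.lower "Publish Date" = "publish date" := rfl
theorem pvLow9 : PySem.Str.lower "Keywords" = "keywords" := rfl

theorem pvGet?_insert_string {ν : Type} (B : PySem.Dict String ν) (H h : String) (x : ν) :
    (B.insert H x).get? h = if h = H then some x else B.get? h := by
  by_cases hh : h = H
  · subst hh; simp [PySem.Dict.get?_insert_self]
  · simp [PySem.Dict.get?_insert_of_ne _ _ hh, hh]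

-- the invariant B's single pass maintains, per header
def pvBestOK (best : PySem.Dict String (Int × String)) (items : List (String × String)) : Prop :=
  best.get? "Title" = pvG items 0 ["Title"] ∧
  best.get? "Media URL" = pvG items 0 ["Media URL", "Image URL"] ∧
  best.get? "Pinterest board" = pvG items 0 ["Pinterest board", "Pinterest Board"] ∧
  best.get? "Thumbnail" = pvG items 0 ["Thumbnail"] ∧
  best.get? "Description" = pvG items 0 ["Description"] ∧
  best.get? "Link" = pvG items 0 ["Link"] ∧
  best.get? "Publish date" = pvG items 0 ["Publish date", "Publish Date"] ∧
  best.get? "Keywords" = pvG items 0 ["Keywords"]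

theorem pvBinv (items : List (String × String)) :
    pvBestOK (items.foldl pvBStep PySem.Dict.empty) items := by
  induction items using List.reverseRecOn with
  | nil => exact ⟨rfl, rfl, rfl, rfl, rfl, rfl, rfl, rfl⟩
  | append_singleton l p ih =>
    rw [List.foldl_append]
    obtain ⟨h1, h2, h3, h4, h5, h6, h7, h8⟩ := ih
    set B := l.foldl pvBStep PySem.Dict.empty with hB
    simp only [List.foldl]
    rcases hco : pvReverse.get? (pvSlc p.1) with _ | ⟨H, i⟩
    · -- no alias hit: best unchanged, every pvLast unchanged
      have hstep : pvBStep B p = B := by unfold pvBStep; rw [hco]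
      have hne : ∀ c ∈ (["title", "media url", "image url", "pinterest board", "thumbnail",
          "description", "link", "publish date", "keywords"] : List String),
          (pvSlc p.1 == c) = false := by
        intro c hcmem
        by_contra hcc
        have hceq : pvSlc p.1 = c := by simpa using hcc
        rw [hceq] at hco
        fin_cases hcmem <;> simp [PySem.Dict.get?, pvReverse_items, List.find?] at hco
      have e1 := hne "title" (by simp)
      have e2 := hne "media url" (by simp)
      have e3 := hne "image url" (by simp)
      have e4 := hne "pinterest board" (by simp)
      have e5 := hne "thumbnail" (by simp)
      have e6 := hne "description" (by simp)
      have e7 := hne "link" (by simp)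
      have e8 := hne "publish date" (by simp)
      have e9 := hne "keywords" (by simp)
      rw [hstep]
      refine ⟨?_, ?_, ?_, ?_, ?_, ?_, ?_, ?_⟩ <;>
        simp [h1, h2, h3, h4, h5, h6, h7, h8, pvG, pvLast_append,
          pvLow1, pvLow2, pvLow3, pvLow4, pvLow4', pvLow5, pvLow6, pvLow7, pvLow8, pvLow8',
          pvLow9, e1, e2, e3, e4, e5, e6, e7, e8, e9]
    · -- some alias hit: identify which
      have hmem := pvGet?_some_mem hco
      rw [pvReverse_items] at hmem
      simp only [List.mem_cons, List.not_mem_nil, or_false, Prod.mk.injEq] at hmem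
      -- helper for the always-insert (priority 0) cases
      have hins0 : ∀ (H' : String) (cs : List String), B.get? H' = pvG l 0 cs →
          pvReverse.get? (pvSlc p.1) = some (H', 0) →
          pvBStep B p = B.insert H' (0, PySem.Str.strip p.2) := by
        intro H' cs hH hco'
        unfold pvBStep
        rw [hco']
        dsimp only
        rw [hH]
        rcases hg : pvG l 0 cs with _ | ⟨j, v⟩
        · rfl
        · have h0 : (0 : Int) ≤ j := pvG_fst_nonneg hg
          simp [h0]
      rcases hmem with ⟨hc, hh, hi⟩ | ⟨hc, hh, hi⟩ | ⟨hc, hh, hi⟩ | ⟨hc, hh, hi⟩ |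
        ⟨hc, hh, hi⟩ | ⟨hc, hh, hi⟩ | ⟨hc, hh, hi⟩ | ⟨hc, hh, hi⟩ | ⟨hc, hh, hi⟩ <;>
        subst hh <;> subst hi
      -- Title
      · rw [hins0 _ _ h1 hco]
        refine ⟨?_, ?_, ?_, ?_, ?_, ?_, ?_, ?_⟩ <;>
          simp [pvGet?_insert_string, h1, h2, h3, h4, h5, h6, h7, h8, pvG, pvLast_append,
            pvLow1, pvLow2, pvLow3, pvLow4, pvLow4', pvLow5, pvLow6, pvLow7, pvLow8, pvLow8',
            pvLow9, hc]
      -- Media URL (priority 0)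
      · rw [hins0 _ _ h2 hco]
        refine ⟨?_, ?_, ?_, ?_, ?_, ?_, ?_, ?_⟩ <;>
          simp [pvGet?_insert_string, h1, h2, h3, h4, h5, h6, h7, h8, pvG, pvLast_append,
            pvLow1, pvLow2, pvLow3, pvLow4, pvLow4', pvLow5, pvLow6, pvLow7, pvLow8, pvLow8',
            pvLow9, hc]
      -- Image URL (priority 1): three subcases
      · have hu : pvBStep B p =
            (match pvLast l "media url" with
             | some _ => B
             | none => B.insert "Media URL" (1, PySem.Str.strip p.2)) := by
          unfold pvBStep
          rw [hco]
          dsimp only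
          rw [h2]
          simp only [pvG, pvLow2, pvLow3]
          rcases hm : pvLast l "media url" with _ | q
          · rcases hi2 : pvLast l "image url" with _ | q2 <;> simp
          · simp
        rcases hm : pvLast l "media url" with _ | q <;> rw [hm] at hu <;> rw [hu] <;>
          refine ⟨?_, ?_, ?_, ?_, ?_, ?_, ?_, ?_⟩ <;>
          simp [pvGet?_insert_string, h1, h2, h3, h4, h5, h6, h7, h8, pvG, pvLast_append,
            pvLow1, pvLow2, pvLow3, pvLow4, pvLow4', pvLow5, pvLow6, pvLow7, pvLow8, pvLow8',
            pvLow9, hc, hm]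
      -- Pinterest board
      · rw [hins0 _ _ h3 hco]
        refine ⟨?_, ?_, ?_, ?_, ?_, ?_, ?_, ?_⟩ <;>
          simp [pvGet?_insert_string, h1, h2, h3, h4, h5, h6, h7, h8, pvG, pvLast_append,
            pvLow1, pvLow2, pvLow3, pvLow4, pvLow4', pvLow5, pvLow6, pvLow7, pvLow8, pvLow8',
            pvLow9, hc]
      -- Thumbnail
      · rw [hins0 _ _ h4 hco]
        refine ⟨?_, ?_, ?_, ?_, ?_, ?_, ?_, ?_⟩ <;>
          simp [pvGet?_insert_string, h1, h2, h3, h4, h5, h6, h7, h8, pvG, pvLast_append,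
            pvLow1, pvLow2, pvLow3, pvLow4, pvLow4', pvLow5, pvLow6, pvLow7, pvLow8, pvLow8',
            pvLow9, hc]
      -- Description
      · rw [hins0 _ _ h5 hco]
        refine ⟨?_, ?_, ?_, ?_, ?_, ?_, ?_, ?_⟩ <;>
          simp [pvGet?_insert_string, h1, h2, h3, h4, h5, h6, h7, h8, pvG, pvLast_append,
            pvLow1, pvLow2, pvLow3, pvLow4, pvLow4', pvLow5, pvLow6, pvLow7, pvLow8, pvLow8',
            pvLow9, hc]
      -- Link
      · rw [hins0 _ _ h6 hco]
        refine ⟨?_, ?_, ?_, ?_, ?_, ?_, ?_, ?_⟩ <;>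
          simp [pvGet?_insert_string, h1, h2, h3, h4, h5, h6, h7, h8, pvG, pvLast_append,
            pvLow1, pvLow2, pvLow3, pvLow4, pvLow4', pvLow5, pvLow6, pvLow7, pvLow8, pvLow8',
            pvLow9, hc]
      -- Publish date
      · rw [hins0 _ _ h7 hco]
        refine ⟨?_, ?_, ?_, ?_, ?_, ?_, ?_, ?_⟩ <;>
          simp [pvGet?_insert_string, h1, h2, h3, h4, h5, h6, h7, h8, pvG, pvLast_append,
            pvLow1, pvLow2, pvLow3, pvLow4, pvLow4', pvLow5, pvLow6, pvLow7, pvLow8, pvLow8',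
            pvLow9, hc]
      -- Keywords
      · rw [hins0 _ _ h8 hco]
        refine ⟨?_, ?_, ?_, ?_, ?_, ?_, ?_, ?_⟩ <;>
          simp [pvGet?_insert_string, h1, h2, h3, h4, h5, h6, h7, h8, pvG, pvLast_append,
            pvLow1, pvLow2, pvLow3, pvLow4, pvLow4', pvLow5, pvLow6, pvLow7, pvLow8, pvLow8',
            pvLow9, hc]

theorem pvA_items (f : String → String) :
    (pvCsvHeaders.foldl (fun nm h => nm.insert h (f h)) PySem.Dict.empty).items =
      pvCsvHeaders.map (fun h => (h, f h)) := by
  have := PySem.Dict.items_foldl_insert_fresh pvCsvHeaders (fun h => h) f PySem.Dict.empty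
    (by intro a _; rfl) (by decide)
  simpa using this

theorem pvGetD1 : pvCsvAliases.getD "Title" [] = ["Title"] := rfl
theorem pvGetD2 : pvCsvAliases.getD "Media URL" [] = ["Media URL", "Image URL"] := rfl
theorem pvGetD3 : pvCsvAliases.getD "Pinterest board" [] = ["Pinterest board", "Pinterest Board"] := rfl
theorem pvGetD4 : pvCsvAliases.getD "Thumbnail" [] = ["Thumbnail"] := rfl
theorem pvGetD5 : pvCsvAliases.getD "Description" [] = ["Description"] := rfl
theorem pvGetD6 : pvCsvAliases.getD "Link" [] = ["Link"] := rfl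
theorem pvGetD7 : pvCsvAliases.getD "Publish date" [] = ["Publish date", "Publish Date"] := rfl
theorem pvGetD8 : pvCsvAliases.getD "Keywords" [] = ["Keywords"] := rfl

-- ===== VERDICT (by name: the statement is the Claim_ definition above) =====
theorem canonicalize_row_py_spec : Claim_equal_canonicalize_row_py := by
  intro row _
  simp only [Spec_canonicalize_row_py, canonicalize_row_py, canonicalize_row_py_alt]
  have hnd : (PySem.Dict.ofList row).keys.Nodup := PySem.Dict.nodup_keys_ofList row
  obtain ⟨b1, b2, b3, b4, b5, b6, b7, b8⟩ := pvBinv (PySem.Dict.ofList row).items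
  rw [pvA_items]
  simp only [pvCsvHeaders, List.map_cons, List.map_nil, List.cons.injEq, Prod.mk.injEq]
  and_intros
  all_goals try trivial
  all_goals
    rw [pvAInner_eq _ hnd, pvFval_pvG _ 0]
    simp only [pvGetD1, pvGetD2, pvGetD3, pvGetD4, pvGetD5, pvGetD6, pvGetD7, pvGetD8,
      b1, b2, b3, b4, b5, b6, b7, b8]
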